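-- pv_equiv track=rewrite | github.com/marcianoo21/CodeForces | CardboardforPictures1100.py | find_w
-- ===== SOURCE A (Python) =====
-- def find_w(n, c, s):
--     sum_s = sum(s)
--     sum_s2 = sum(x*x for x in s)
--     # f(w) = sum_s2 + 4*w*sum_s + 4*n*w*w
--     def f(w):
--         return sum_s2 + 4*w*sum_s + 4*n*w*w
--
--     lo = 1
--     hi = 1
--     while f(hi) < c:
--         hi <<= 1
--     # binary search lowest w with f(w) >= c
--     while lo < hi:
--         mid = (lo + hi) // 2
--         if f(mid) < c:
--             lo = mid + 1
--         else:
--             hi = mid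
--     return lo
-- ===== SOURCE B (Python) =====
-- # B: closed-form jump to the quadratic's positive root via an integer Newton
-- # square root, then a tiny +-1 verification walk, instead of A's exponential
-- # doubling + binary search.
--
-- def _isqrt(a):
--     if a <= 1:
--         return a
--     x = a
--     y = (x + 1) // 2
--     while y < x:
--         x = y
--         y = (x + a // x) // 2
--     return x
--
--
-- def find_w(n, c, s):
--     sum_s = sum(s)
--     sum_s2 = sum(x * x for x in s)
--
--     def f(w):
--         return sum_s2 + 4 * w * sum_s + 4 * n * w * w
--
--     if f(1) >= c:
--         return 1
--     # f(1) < c and n >= 1: on w >= 1 the feasible set {w : f(w) >= c} is an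
--     # upward-closed ray; jump to (about) its start, the larger root of
--     # 4n*w^2 + 4*sum_s*w + (sum_s2 - c) = 0, then verify locally.
--     D = 16 * sum_s * sum_s - 16 * n * (sum_s2 - c)
--     r = _isqrt(D) if D >= 0 else 0
--     w = (-4 * sum_s + r) // (8 * n)
--     if w < 1:
--         w = 1
--     while f(w) < c:
--         w += 1
--     while w > 1 and f(w - 1) >= c:
--         w -= 1
--     return w
-- ===== Notes on version B (the rewrite author's own statement) =====
-- stated objective: alternative
-- what changed: B replaces A's exponential-doubling-plus-binary-search with a closed-form jump: it solves 4n*w^2+4*sum_s*w+(sum_s2-c)>=0 via a hand-written integer Newton square root of the discriminant and then verifies the candidate with a tiny +-1 walk.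
-- outside the precondition, e.g. on find_w(0, 100, [1]): A returns 25, B raises ZeroDivisionError
import Mathlib
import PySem

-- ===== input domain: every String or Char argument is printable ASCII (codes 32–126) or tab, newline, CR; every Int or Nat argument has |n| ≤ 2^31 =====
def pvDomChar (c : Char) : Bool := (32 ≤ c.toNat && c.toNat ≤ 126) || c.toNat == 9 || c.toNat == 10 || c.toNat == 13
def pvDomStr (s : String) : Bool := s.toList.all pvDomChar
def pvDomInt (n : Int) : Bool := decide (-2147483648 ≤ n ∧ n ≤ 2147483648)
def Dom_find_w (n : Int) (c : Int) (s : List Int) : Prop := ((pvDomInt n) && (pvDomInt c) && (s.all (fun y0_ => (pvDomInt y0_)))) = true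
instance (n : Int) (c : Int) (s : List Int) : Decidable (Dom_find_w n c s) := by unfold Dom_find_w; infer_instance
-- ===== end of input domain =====

-- B replaces A's doubling + binary search with a closed-form jump to the quadratic's
-- positive root (integer Newton isqrt of the discriminant) plus a ±1 verification walk.

-- f(w) = sum_s2 + 4*w*sum_s + 4*n*w*w  (shared shape of both Pythons' inner f)
def pvF (n ss ss2 w : Int) : Int := ss2 + 4*w*ss + 4*n*w*w

-- ===== PORT A =====
-- A's `while f(hi) < c: hi <<= 1` loop; the fuel only totalizes it (proved sufficient under Pre_).
def pvDouble (n ss ss2 c : Int) : Nat → Int → Int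
  | 0, hi => hi
  | fuel+1, hi => if pvF n ss ss2 hi < c then pvDouble n ss ss2 c fuel (2*hi) else hi

-- A's binary search `while lo < hi: mid = (lo+hi)//2; …`
def pvBin (n ss ss2 c lo hi : Int) : Int :=
  if h : lo < hi then
    if pvF n ss ss2 (PySem.Int.floordiv (lo + hi) 2) < c then
      pvBin n ss ss2 c (PySem.Int.floordiv (lo + hi) 2 + 1) hi
    else
      pvBin n ss ss2 c lo (PySem.Int.floordiv (lo + hi) 2)
  else lo
termination_by (hi - lo).toNat
decreasing_by
  · have h1 : lo * 2 ≤ lo + hi := by omega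
    have h2 : lo ≤ PySem.Int.floordiv (lo + hi) 2 :=
      (PySem.Int.le_floordiv_iff_mul_le (by omega)).2 h1
    omega
  · have h1 : lo + hi < hi * 2 := by omega
    have h2 : PySem.Int.floordiv (lo + hi) 2 < hi :=
      (PySem.Int.floordiv_lt_iff_lt_mul (by omega)).2 h1
    have h3 : lo ≤ PySem.Int.floordiv (lo + hi) 2 :=
      (PySem.Int.le_floordiv_iff_mul_le (by omega)).2 (by omega)
    omega

def find_w (n : Int) (c : Int) (s : List Int) : Int :=
  let ss := s.foldl (fun a x => a + x) 0
  let ss2 := s.foldl (fun a x => a + x*x) 0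
  pvBin n ss ss2 c 1 (pvDouble n ss ss2 c (1 + |ss| + |c| + |ss2|).toNat 1)

-- ===== PORT B =====
-- hand-written integer Newton square root from Source B (fuel totalizes the loop; x strictly decreases)
def pvIsqrtGo (a : Int) : Nat → Int → Int → Int
  | 0, x, _ => x
  | fuel+1, x, y =>
      if y < x then
        pvIsqrtGo a fuel y (PySem.Int.floordiv (y + PySem.Int.floordiv a y) 2)
      else x

def pvIsqrt (a : Int) : Int :=
  if a ≤ 1 then a else pvIsqrtGo a (a.toNat + 1) a (PySem.Int.floordiv (a + 1) 2)

-- Source B's `while f(w) < c: w += 1` (fuel totalizes it; proved sufficient under Pre_)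
def pvUp (n ss ss2 c : Int) : Nat → Int → Int
  | 0, w => w
  | fuel+1, w => if pvF n ss ss2 w < c then pvUp n ss ss2 c fuel (w+1) else w

-- Source B's `while w > 1 and f(w-1) >= c: w -= 1`
def pvDown (n ss ss2 c : Int) : Nat → Int → Int
  | 0, w => w
  | fuel+1, w => if 1 < w ∧ c ≤ pvF n ss ss2 (w-1) then pvDown n ss ss2 c fuel (w-1) else w

def find_w_alt (n : Int) (c : Int) (s : List Int) : Int :=
  let ss := s.foldl (fun a x => a + x) 0
  let ss2 := s.foldl (fun a x => a + x*x) 0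
  if c ≤ pvF n ss ss2 1 then 1
  else
    let D := 16*ss*ss - 16*n*(ss2 - c)
    let r := if 0 ≤ D then pvIsqrt D else 0
    let w0 := PySem.Int.floordiv (-4*ss + r) (8*n)
    let w1 := if w0 < 1 then 1 else w0
    let w2 := pvUp n ss ss2 c ((1 + |ss| + |c| + |ss2|) - w1).toNat w1
    pvDown n ss ss2 c w2.toNat w2

-- ===== PRECONDITION & SPEC =====
-- Pre_ admits 1 ≤ n (the problem's positive picture count) plus any input with f(1) ≥ c
-- (both programs return 1 there); for the remaining n ≤ 0 inputs A's doubling loop can run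
-- forever and, where it happens to return, B's closed-form step divides by 8*n
-- (ZeroDivisionError at n = 0).
def Pre_find_w (n : Int) (c : Int) (s : List Int) : Prop :=
  1 ≤ n ∨ c ≤ pvF n (s.foldl (fun a x => a + x) 0) (s.foldl (fun a x => a + x*x) 0) 1
instance (n : Int) (c : Int) (s : List Int) : Decidable (Pre_find_w n c s) := by unfold Pre_find_w; infer_instance
def pvWitness_find_w : Int × Int × List Int := (1, 5, [1])

def Spec_find_w (n : Int) (c : Int) (s : List Int) (out : Int) : Prop := out = find_w_alt n c s
instance (n : Int) (c : Int) (s : List Int) (out : Int) : Decidable (Spec_find_w n c s out) := by unfold Spec_find_w; infer_instance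

-- ===== CLAIM (what is proved, stated in full; the proofs are below) =====
def Claim_equal_find_w : Prop := ∀ (n : Int) (c : Int) (s : List Int), Dom_find_w n c s → Pre_find_w n c s → Spec_find_w n c s (find_w n c s)

-- ===== LEMMAS AND PROOFS =====

-- any w past 1 + |ss| + |c| + |ss2| satisfies f(w) ≥ c (n ≥ 1)
theorem pvF_big (n ss ss2 c w : Int) (hn : 1 ≤ n)
    (hw : 1 + |ss| + |c| + |ss2| ≤ w) : c ≤ pvF n ss ss2 w := by
  have h1 : ss2 ≥ -|ss2| := neg_abs_le ss2
  have h2 : ss ≥ -|ss| := neg_abs_le ss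
  have h3 : c ≤ |c| := le_abs_self c
  have h4 : (0:Int) ≤ |ss| := abs_nonneg ss
  have h5 : (0:Int) ≤ |c| := abs_nonneg c
  have h6 : (0:Int) ≤ |ss2| := abs_nonneg ss2
  have hw1 : 1 ≤ w := by omega
  unfold pvF
  nlinarith [mul_nonneg (by omega : (0:Int) ≤ w - 1) (by omega : (0:Int) ≤ w - |ss|),
             mul_nonneg (by omega : (0:Int) ≤ w) (by omega : (0:Int) ≤ w - |ss|),
             mul_nonneg (by omega : (0:Int) ≤ n - 1) (mul_nonneg (by omega : (0:Int) ≤ w) (mul_self_nonneg w))]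

-- once f(1) < c ≤ f(u), every v ≥ u also has f(v) ≥ c (convexity; n ≥ 1)
theorem pvF_mono (n ss ss2 c : Int) (hn : 1 ≤ n) (h1 : pvF n ss ss2 1 < c) :
    ∀ u v : Int, 1 ≤ u → u ≤ v → c ≤ pvF n ss ss2 u → c ≤ pvF n ss ss2 v := by
  intro u v hu huv hPu
  have hu1 : 1 < u := by
    rcases lt_or_eq_of_le hu with h | h
    · exact h
    · exfalso; rw [← h] at hPu; omega
  have hfu1 : pvF n ss ss2 u - pvF n ss ss2 1 = 4*((u-1)*(n*(u+1)+ss)) := by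
    unfold pvF; ring
  have hkey : 0 < n*(u+1) + ss := by nlinarith
  have hfvu : pvF n ss ss2 v - pvF n ss ss2 u = 4*((v-u)*(n*(v+u)+ss)) := by
    unfold pvF; ring
  have hge : n*(u+1) + ss ≤ n*(v+u) + ss := by nlinarith
  have : 0 ≤ (v-u)*(n*(v+u)+ss) := mul_nonneg (by omega) (by omega)
  omega

theorem pvDouble_spec (n ss ss2 c : Int) (hn : 1 ≤ n) :
    ∀ (fuel : Nat) (hi : Int), 1 ≤ hi → 1 + |ss| + |c| + |ss2| ≤ hi + (fuel : Int) →
      1 ≤ pvDouble n ss ss2 c fuel hi ∧ c ≤ pvF n ss ss2 (pvDouble n ss ss2 c fuel hi) := by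
  intro fuel
  induction fuel with
  | zero =>
    intro hi h1 h2
    simp only [pvDouble]
    exact ⟨h1, pvF_big n ss ss2 c hi hn (by push_cast at h2; omega)⟩
  | succ k ih =>
    intro hi h1 h2
    simp only [pvDouble]
    by_cases hcond : pvF n ss ss2 hi < c
    · rw [if_pos hcond]
      exact ih (2*hi) (by omega) (by push_cast at h2 ⊢; omega)
    · rw [if_neg hcond]
      exact ⟨h1, not_lt.mp hcond⟩

theorem pvDouble_one (n ss ss2 c : Int) (h : ¬ pvF n ss ss2 1 < c) (fuel : Nat) :
    pvDouble n ss ss2 c fuel 1 = 1 := by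
  cases fuel with
  | zero => rfl
  | succ k => simp only [pvDouble]; rw [if_neg h]

theorem pvBin_spec (n ss ss2 c : Int)
    (M : ∀ u v : Int, 1 ≤ u → u ≤ v → c ≤ pvF n ss ss2 u → c ≤ pvF n ss ss2 v) :
    ∀ (k : Nat) (lo hi : Int), (hi - lo).toNat = k → 1 ≤ lo → lo ≤ hi →
      c ≤ pvF n ss ss2 hi → (∀ w : Int, 1 ≤ w → w < lo → pvF n ss ss2 w < c) →
      1 ≤ pvBin n ss ss2 c lo hi ∧ c ≤ pvF n ss ss2 (pvBin n ss ss2 c lo hi) ∧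
        (∀ w : Int, 1 ≤ w → w < pvBin n ss ss2 c lo hi → pvF n ss ss2 w < c) := by
  intro k
  induction k using Nat.strong_induction_on with
  | _ k ih =>
    intro lo hi hk hlo hlh hPhi hinv
    rw [pvBin]
    by_cases h : lo < hi
    · rw [dif_pos h]
      have hmlo : lo ≤ PySem.Int.floordiv (lo + hi) 2 :=
        (PySem.Int.le_floordiv_iff_mul_le (by omega)).2 (by omega)
      have hmhi : PySem.Int.floordiv (lo + hi) 2 < hi :=
        (PySem.Int.floordiv_lt_iff_lt_mul (by omega)).2 (by omega)
      set mid := PySem.Int.floordiv (lo + hi) 2 with hmid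
      by_cases hcond : pvF n ss ss2 mid < c
      · rw [if_pos hcond]
        refine ih (hi - (mid+1)).toNat (by omega) (mid+1) hi rfl (by omega) (by omega) hPhi ?_
        intro w hw1 hw2
        rcases lt_or_ge w lo with hwl | hwl
        · exact hinv w hw1 hwl
        · by_contra hc
          exact absurd (M w mid hw1 (by omega) (not_lt.mp hc)) (by omega)
      · rw [if_neg hcond]
        exact ih (mid - lo).toNat (by omega) lo mid rfl hlo hmlo (not_lt.mp hcond) hinv
    · rw [dif_neg h]
      have : lo = hi := by omega
      exact ⟨hlo, this ▸ hPhi, fun w hw1 hw2 => hinv w hw1 hw2⟩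

theorem pvUp_spec (n ss ss2 c : Int) (hn : 1 ≤ n) :
    ∀ (fuel : Nat) (w : Int), 1 ≤ w → 1 + |ss| + |c| + |ss2| ≤ w + (fuel : Int) →
      w ≤ pvUp n ss ss2 c fuel w ∧ c ≤ pvF n ss ss2 (pvUp n ss ss2 c fuel w) := by
  intro fuel
  induction fuel with
  | zero =>
    intro w h1 h2
    simp only [pvUp]
    exact ⟨le_refl w, pvF_big n ss ss2 c w hn (by push_cast at h2; omega)⟩
  | succ k ih =>
    intro w h1 h2
    simp only [pvUp]
    by_cases hcond : pvF n ss ss2 w < c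
    · rw [if_pos hcond]
      obtain ⟨ha, hb⟩ := ih (w+1) (by omega) (by push_cast at h2 ⊢; omega)
      exact ⟨by omega, hb⟩
    · rw [if_neg hcond]
      exact ⟨le_refl w, not_lt.mp hcond⟩

theorem pvDown_spec (n ss ss2 c : Int)
    (M : ∀ u v : Int, 1 ≤ u → u ≤ v → c ≤ pvF n ss ss2 u → c ≤ pvF n ss ss2 v) :
    ∀ (fuel : Nat) (w : Int), 1 ≤ w → w - 1 ≤ (fuel : Int) → c ≤ pvF n ss ss2 w →
      1 ≤ pvDown n ss ss2 c fuel w ∧ c ≤ pvF n ss ss2 (pvDown n ss ss2 c fuel w) ∧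
        (∀ v : Int, 1 ≤ v → v < pvDown n ss ss2 c fuel w → pvF n ss ss2 v < c) := by
  intro fuel
  induction fuel with
  | zero =>
    intro w h1 h2 hP
    have hw : w = 1 := by omega
    simp only [pvDown]
    exact ⟨by omega, hP, fun v hv1 hv2 => by omega⟩
  | succ k ih =>
    intro w h1 h2 hP
    simp only [pvDown]
    by_cases hcond : 1 < w ∧ c ≤ pvF n ss ss2 (w-1)
    · rw [if_pos hcond]
      exact ih (w-1) (by omega) (by push_cast at h2 ⊢; omega) hcond.2
    · rw [if_neg hcond]
      refine ⟨h1, hP, ?_⟩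
      intro v hv1 hv2
      rcases not_and_or.mp hcond with hw | hnP
      · omega
      · by_contra hc
        exact hnP (M v (w-1) hv1 (by omega) (not_lt.mp hc))

-- the two ports on shared (ss, ss2)
theorem pv_main (n c ss ss2 : Int) (hpre : 1 ≤ n ∨ c ≤ pvF n ss ss2 1) :
    pvBin n ss ss2 c 1 (pvDouble n ss ss2 c (1 + |ss| + |c| + |ss2|).toNat 1) =
    (if c ≤ pvF n ss ss2 1 then 1
     else
       let D := 16*ss*ss - 16*n*(ss2 - c)
       let r := if 0 ≤ D then pvIsqrt D else 0
       let w0 := PySem.Int.floordiv (-4*ss + r) (8*n)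
       let w1 := if w0 < 1 then 1 else w0
       let w2 := pvUp n ss ss2 c ((1 + |ss| + |c| + |ss2|) - w1).toNat w1
       pvDown n ss ss2 c w2.toNat w2) := by
  have habs : (0:Int) ≤ |ss| := abs_nonneg ss
  have habsc : (0:Int) ≤ |c| := abs_nonneg c
  have habs2 : (0:Int) ≤ |ss2| := abs_nonneg ss2
  by_cases hc1 : c ≤ pvF n ss ss2 1
  · rw [if_pos hc1, pvDouble_one n ss ss2 c (not_lt.mpr hc1)]
    rw [pvBin]; simp
  · rw [if_neg hc1]
    have hn : 1 ≤ n := hpre.resolve_right hc1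
    have h1 : pvF n ss ss2 1 < c := not_le.mp hc1
    have M := pvF_mono n ss ss2 c hn h1
    -- A side
    obtain ⟨hhi1, hhiP⟩ := pvDouble_spec n ss ss2 c hn (1 + |ss| + |c| + |ss2|).toNat 1
      (le_refl 1) (by omega)
    obtain ⟨hA1, hAP, hAmin⟩ := pvBin_spec n ss ss2 c M
      ((pvDouble n ss ss2 c (1 + |ss| + |c| + |ss2|).toNat 1) - 1).toNat
      1 (pvDouble n ss ss2 c (1 + |ss| + |c| + |ss2|).toNat 1) rfl (le_refl 1) hhi1 hhiP
      (fun w hw1 hw2 => by omega)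
    -- B side
    set w1 : Int := if PySem.Int.floordiv (-4*ss + (if 0 ≤ 16*ss*ss - 16*n*(ss2 - c) then
        pvIsqrt (16*ss*ss - 16*n*(ss2 - c)) else 0)) (8*n) < 1 then 1
      else PySem.Int.floordiv (-4*ss + (if 0 ≤ 16*ss*ss - 16*n*(ss2 - c) then
        pvIsqrt (16*ss*ss - 16*n*(ss2 - c)) else 0)) (8*n) with hw1def
    have hw11 : 1 ≤ w1 := by rw [hw1def]; split <;> omega
    obtain ⟨hup1, hupP⟩ := pvUp_spec n ss ss2 c hn ((1 + |ss| + |c| + |ss2|) - w1).toNat w1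
      hw11 (by omega)
    obtain ⟨hB1, hBP, hBmin⟩ := pvDown_spec n ss ss2 c M
      (pvUp n ss ss2 c ((1 + |ss| + |c| + |ss2|) - w1).toNat w1).toNat
      (pvUp n ss ss2 c ((1 + |ss| + |c| + |ss2|) - w1).toNat w1) (by omega) (by omega) hupP
    -- both are the least w ≥ 1 with c ≤ f(w)
    set rA := pvBin n ss ss2 c 1 (pvDouble n ss ss2 c (1 + |ss| + |c| + |ss2|).toNat 1)
    set rB := pvDown n ss ss2 c
      (pvUp n ss ss2 c ((1 + |ss| + |c| + |ss2|) - w1).toNat w1).toNat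
      (pvUp n ss ss2 c ((1 + |ss| + |c| + |ss2|) - w1).toNat w1)
    show rA = rB
    rcases lt_trichotomy rA rB with h | h | h
    · exact absurd hAP (by have := hBmin rA hA1 h; omega)
    · exact h
    · exact absurd hBP (by have := hAmin rB hB1 h; omega)

-- ===== VERDICT (by name: the statement is the Claim_ definition above) =====
theorem find_w_spec : Claim_equal_find_w := by
  intro n c s _ hpre
  simp only [Spec_find_w, find_w, find_w_alt]
  exact pv_main n c (s.foldl (fun a x => a + x) 0) (s.foldl (fun a x => a + x*x) 0) hpre
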